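-- pv_equiv track=rewrite | github.com/nazariyv/leetcode | contests/16_05_2020/2.py | helper
-- ===== SOURCE A (Python) =====
-- from typing import List
-- from math import gcd as bltin_gcd
--
-- def coprime(a: int, b: int) -> bool:
--     return bltin_gcd(a, b) == 1
--
-- def helper(n: int) -> List[str]:
--     res: List[str] = []
--     denominator = n
--
--     for i in range(1, n):
--         numerator = i
--
--         if i == 1:
--             res.append(f"{i}/{denominator}")
--             continue
--
--         if coprime(i, denominator):
--             res.append(f"{i}/{denominator}")
--
--     return res
-- ===== SOURCE B (Python) =====
-- def helper(n):
--     # Sieve: mark every multiple of every proper divisor of n (greater than one), then collect unmarked numerators.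
--     marked = set()
--     for d in range(2, n):
--         if n % d == 0:
--             marked.update(range(d, n, d))
--     return [f"{i}/{n}" for i in range(1, n) if i not in marked]
-- ===== Notes on version B (the rewrite author's own statement) =====
-- stated objective: alternative
-- what changed: Replaces A's per-element gcd coprimality test with a sieve: mark all multiples of each proper divisor of n (greater than one) in a set once, then collect the unmarked numerators in one pass.
import Mathlib
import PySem

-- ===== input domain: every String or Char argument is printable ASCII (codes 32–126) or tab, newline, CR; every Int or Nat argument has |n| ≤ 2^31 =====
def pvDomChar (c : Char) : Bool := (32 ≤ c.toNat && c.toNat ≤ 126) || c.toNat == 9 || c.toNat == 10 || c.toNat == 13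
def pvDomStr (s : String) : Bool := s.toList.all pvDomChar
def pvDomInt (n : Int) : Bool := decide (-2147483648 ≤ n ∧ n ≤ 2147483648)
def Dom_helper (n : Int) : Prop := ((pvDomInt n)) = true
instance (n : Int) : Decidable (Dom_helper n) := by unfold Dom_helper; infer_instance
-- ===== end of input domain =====

-- B replaces the per-element gcd test with a divisor sieve (mark multiples of each proper
-- divisor of n greater than one, then collect the unmarked numerators); alternative algorithm, same output.

-- ===== PORT A =====
def coprimeA (a b : Int) : Bool := Int.gcd a b == 1

def helper (n : Int) : List String :=
  (PySem.List.pyRange 1 n 1).foldl (fun res i =>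
    if i == 1 then res ++ [PySem.Int.toStr i ++ "/" ++ PySem.Int.toStr n]
    else if coprimeA i n then res ++ [PySem.Int.toStr i ++ "/" ++ PySem.Int.toStr n]
    else res) []

-- ===== PORT B =====
def helperAltMarked (n : Int) : PySem.Set Int :=
  (PySem.List.pyRange 2 n 1).foldl (fun s d =>
    if PySem.Int.mod n d == 0 then PySem.Set.update s (PySem.List.pyRange d n d) else s)
    PySem.Set.empty

def helper_alt (n : Int) : List String :=
  let marked := helperAltMarked n
  (PySem.List.pyRange 1 n 1).foldl (fun res i =>
    if !(PySem.Set.contains marked i) then res ++ [PySem.Int.toStr i ++ "/" ++ PySem.Int.toStr n]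
    else res) []

-- ===== PRECONDITION & SPEC =====
def Spec_helper (n : Int) (out : List String) : Prop := out = helper_alt n
instance (n : Int) (out : List String) : Decidable (Spec_helper n out) := by unfold Spec_helper; infer_instance

-- ===== CLAIM (what is proved, stated in full; the proofs are below) =====
def Claim_equal_helper : Prop := ∀ (n : Int), Dom_helper n → Spec_helper n (helper n)

-- ===== LEMMAS AND PROOFS =====

-- Membership in the sieve fold: x is marked iff some listed d divides n and x lies in range(d, n, d).
lemma mem_marked_fold (n x : Int) (L : List Int) (s : PySem.Set Int) :
    x ∈ L.foldl (fun s d =>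
        if PySem.Int.mod n d == 0 then PySem.Set.update s (PySem.List.pyRange d n d) else s) s
    ↔ x ∈ s ∨ ∃ d ∈ L, PySem.Int.mod n d = 0 ∧ x ∈ PySem.List.pyRange d n d := by
  induction L generalizing s with
  | nil => simp
  | cons d t ih =>
    simp only [List.foldl_cons, ih]
    by_cases h : PySem.Int.mod n d = 0
    · simp [h, PySem.Set.mem_update, or_assoc]
    · simp [h]

-- For 1 ≤ i < n: i is marked iff gcd(i, n) ≠ 1.
lemma mem_marked_iff (n i : Int) (h1 : 1 ≤ i) (h2 : i < n) :
    i ∈ helperAltMarked n ↔ Int.gcd i n ≠ 1 := by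
  unfold helperAltMarked
  rw [mem_marked_fold]
  simp only [PySem.Set.empty, List.not_mem_nil, false_or]
  constructor
  · rintro ⟨d, hdL, hmod, hmem⟩
    rw [PySem.List.mem_pyRange_one] at hdL
    obtain ⟨hd2, hdn⟩ := hdL
    rw [PySem.List.mem_pyRange_iff_of_pos (by omega)] at hmem
    have hdvd_i : d ∣ i := by have := dvd_add hmem.2.2 (dvd_refl d); simpa using this
    have hdvd_n : d ∣ n := (PySem.Int.mod_eq_zero_iff_dvd n d).mp hmod
    intro hg
    obtain ⟨u, v, huv⟩ := Int.isCoprime_iff_gcd_eq_one.mpr hg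
    have hd1 : d ∣ 1 := huv ▸ dvd_add (Dvd.dvd.mul_left hdvd_i u) (Dvd.dvd.mul_left hdvd_n v)
    have := Int.le_of_dvd one_pos hd1
    omega
  · intro hg
    set g : Int := (Int.gcd i n : Int) with hgdef
    have hgi : g ∣ i := Int.gcd_dvd_left i n
    have hgn : g ∣ n := Int.gcd_dvd_right i n
    have hg0 : Int.gcd i n ≠ 0 := by
      intro h0
      have := Int.gcd_eq_zero_iff.mp h0
      omega
    have hg2 : 2 ≤ g := by
      have h2' : 2 ≤ Int.gcd i n := by omega
      rw [hgdef]; exact_mod_cast h2'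
    have hgle : g ≤ i := Int.le_of_dvd (by omega) hgi
    refine ⟨g, ?_, ?_, ?_⟩
    · rw [PySem.List.mem_pyRange_one]; omega
    · exact (PySem.Int.mod_eq_zero_iff_dvd n g).mpr hgn
    · rw [PySem.List.mem_pyRange_iff_of_pos (by omega)]
      exact ⟨by omega, by omega, dvd_sub hgi (dvd_refl g)⟩

-- ===== VERDICT (by name: the statement is the Claim_ definition above) =====
theorem helper_spec : Claim_equal_helper := by
  intro n _
  unfold Spec_helper helper helper_alt
  apply PySem.List.foldl_congr_mem
  intro acc i hi
  rw [PySem.List.mem_pyRange_one] at hi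
  have key : (!PySem.Set.contains (helperAltMarked n) i) = (Int.gcd i n == 1) := by
    by_cases hg : Int.gcd i n = 1
    · have : i ∉ helperAltMarked n := fun hm => (mem_marked_iff n i hi.1 hi.2).mp hm hg
      simp [hg, PySem.Set.contains_eq_listContains, this]
    · have : i ∈ helperAltMarked n := (mem_marked_iff n i hi.1 hi.2).mpr hg
      simp [hg, PySem.Set.contains_eq_listContains, this]
  rw [key]
  by_cases h1 : i = 1
  · subst h1
    simp [Int.one_gcd]
  · simp only [beq_iff_eq, h1, if_false, coprimeA]
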